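-- pv_equiv track=rewrite | github.com/BTung0109/BTAP_TRI_TUE_NHAN_TAO | Genetic_alogorithm.py | tinh_cost
-- ===== SOURCE A (Python) =====
-- def tinh_cost(trang_thai):
--     dem_cot = {}
--     for c in trang_thai:
--         dem_cot[c] = dem_cot.get(c, 0) + 1
--     dem = 0
--     for v in dem_cot.values():
--         if v > 1:
--             dem += v * (v - 1) // 2
--     return dem
-- ===== SOURCE B (Python) =====
-- def tinh_cost(trang_thai):
--     dem = 0
--     seen = []
--     for c in trang_thai:
--         dem += seen.count(c)
--         seen.append(c)
--     return dem
-- ===== Notes on version B (the rewrite author's own statement) =====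
-- stated objective: alternative
-- what changed: B drops A's frequency dictionary and the v*(v-1)//2 closed form, instead making one pass that adds, for each element, the number of its earlier occurrences (seen.count).
import Mathlib
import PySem

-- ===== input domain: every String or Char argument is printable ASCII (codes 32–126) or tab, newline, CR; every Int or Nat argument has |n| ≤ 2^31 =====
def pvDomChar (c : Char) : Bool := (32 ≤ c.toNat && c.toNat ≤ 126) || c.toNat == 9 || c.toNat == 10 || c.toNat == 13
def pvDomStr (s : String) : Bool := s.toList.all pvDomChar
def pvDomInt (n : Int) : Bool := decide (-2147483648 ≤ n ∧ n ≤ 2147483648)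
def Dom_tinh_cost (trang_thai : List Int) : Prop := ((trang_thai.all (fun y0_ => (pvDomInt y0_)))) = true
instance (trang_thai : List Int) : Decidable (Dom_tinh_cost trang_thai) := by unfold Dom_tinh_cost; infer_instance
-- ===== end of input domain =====

-- B replaces A's frequency dict + C(v,2) formula with a single pass counting, for each
-- element, its earlier occurrences (objective: alternative decomposition, no dict, no formula).

-- ===== PORT A =====
def tinh_cost (trang_thai : List Int) : Int :=
  let dem_cot : PySem.Dict Int Int :=
    trang_thai.foldl (fun d c => d.insert c (d.getD c 0 + 1)) PySem.Dict.empty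
  dem_cot.values.foldl
    (fun dem v => if v > 1 then dem + PySem.Int.floordiv (v * (v - 1)) 2 else dem) 0

-- ===== PORT B =====
def tinh_cost_alt (trang_thai : List Int) : Int :=
  (trang_thai.foldl
    (fun (st : Int × List Int) c => (st.1 + (PySem.List.count st.2 c : Int), st.2 ++ [c]))
    (0, [])).1

-- ===== PRECONDITION & SPEC =====
def Spec_tinh_cost (trang_thai : List Int) (out : Int) : Prop := out = tinh_cost_alt trang_thai
instance (trang_thai : List Int) (out : Int) : Decidable (Spec_tinh_cost trang_thai out) := by unfold Spec_tinh_cost; infer_instance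

-- ===== CLAIM (what is proved, stated in full; the proofs are below) =====
def Claim_equal_tinh_cost : Prop := ∀ (trang_thai : List Int), Dom_tinh_cost trang_thai → Spec_tinh_cost trang_thai (tinh_cost trang_thai)

-- ===== LEMMAS AND PROOFS =====

-- contribution of one multiplicity, as in A's second loop
def pvG (v : Int) : Int := if v > 1 then PySem.Int.floordiv (v * (v - 1)) 2 else 0

theorem pvG_eq (v : Int) (hv : 0 ≤ v) : pvG v = v * (v - 1) / 2 := by
  unfold pvG
  split_ifs with h
  · rw [PySem.Int.floordiv_eq_ediv_of_pos (by omega)]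
  · interval_cases v <;> decide

theorem pvG_succ (c : Int) (hc : 0 ≤ c) : pvG (c + 1) = pvG c + c := by
  rw [pvG_eq _ (by omega), pvG_eq _ hc]
  have h : (c + 1) * (c + 1 - 1) = c * (c - 1) + c * 2 := by ring
  rw [h, Int.add_mul_ediv_right _ _ (by norm_num)]

theorem pvFoldl_g (vs : List Int) (a : Int) :
    vs.foldl (fun dem v => if v > 1 then dem + PySem.Int.floordiv (v * (v - 1)) 2 else dem) a
      = a + (vs.map pvG).sum := by
  induction vs generalizing a with
  | nil => simp
  | cons v t ih =>
    simp only [List.foldl_cons, List.map_cons, List.sum_cons, ih]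
    unfold pvG
    split_ifs <;> ring

theorem pvA_eq_sum (l : List Int) :
    tinh_cost l = ((PySem.Set.ofList l).map (fun k => pvG (List.count k l : Int))).sum := by
  have h1 : tinh_cost l = List.foldl
      (fun dem v => if v > 1 then dem + PySem.Int.floordiv (v * (v - 1)) 2 else dem) 0
      (l.foldl (fun d c => d.insert c (d.getD c 0 + 1)) PySem.Dict.empty).values := rfl
  have hv : (PySem.Dict.counter l).values
      = (PySem.Set.ofList l).map (fun k => (List.count k l : Int)) := by
    show (PySem.Dict.counter l).items.map (·.2) = _
    rw [PySem.Dict.items_counter, List.map_map]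
    simp [Function.comp]
  rw [h1, PySem.Dict.foldl_insert_getD_add_one_eq_counter, hv, pvFoldl_g, List.map_map,
    zero_add]
  rfl

-- replacing f by f' which agrees off x (x present once) shifts the sum by d
theorem pvSum_update (K : List Int) (hK : K.Nodup) (x : Int) (hx : x ∈ K)
    (f f' : Int → Int) (d : Int)
    (hne : ∀ k, k ≠ x → f' k = f k) (hx' : f' x = f x + d) :
    (K.map f').sum = (K.map f).sum + d := by
  induction K with
  | nil => cases hx
  | cons k t ih =>
    rcases List.mem_cons.mp hx with h | h
    · subst h
      have hxt : x ∉ t := (List.nodup_cons.mp hK).1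
      have : t.map f' = t.map f :=
        List.map_congr_left (fun y hy => hne y (fun he => hxt (he ▸ hy)))
      simp only [List.map_cons, List.sum_cons, this, hx']
      ring
    · have hk : k ≠ x := fun he => (List.nodup_cons.mp hK).1 (he ▸ h)
      simp only [List.map_cons, List.sum_cons,
        ih (List.nodup_cons.mp hK).2 h, hne k hk]
      ring

theorem pvOfList_append (l : List Int) (x : Int) :
    PySem.Set.ofList (l ++ [x])
      = if x ∈ l then PySem.Set.ofList l else PySem.Set.ofList l ++ [x] := by
  rw [PySem.Set.ofList_append]
  show PySem.Set.add _ x = _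
  unfold PySem.Set.add
  have : (PySem.Set.ofList l).contains x = (x ∈ l : Bool) := by
    simp [PySem.Set.mem_ofList]
  rw [this]
  split_ifs with h <;> simp_all

theorem pvA_append (l : List Int) (x : Int) :
    tinh_cost (l ++ [x]) = tinh_cost l + List.count x l := by
  rw [pvA_eq_sum, pvA_eq_sum, pvOfList_append]
  by_cases hx : x ∈ l
  · simp only [if_pos hx]
    refine pvSum_update _ (PySem.Set.nodup_ofList l) x
      ((PySem.Set.mem_ofList l x).mpr hx) _ _ _ (fun k hk => ?_) ?_
    · have : List.count k (l ++ [x]) = List.count k l := by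
        simp [List.count_append, Ne.symm hk]
      rw [this]
    · have : List.count x (l ++ [x]) = List.count x l + 1 := by
        simp
      rw [this]
      push_cast
      exact pvG_succ _ (by positivity)
  · simp only [if_neg hx, List.map_append, List.sum_append, List.map_singleton,
      List.sum_singleton]
    have h0 : List.count x l = 0 := List.count_eq_zero.mpr hx
    have hgx : pvG ((List.count x (l ++ [x]) : Nat) : Int) = 0 := by
      have : List.count x (l ++ [x]) = 1 := by simp [h0]
      rw [this]
      decide
    rw [hgx, h0]
    have : ∀ k ∈ PySem.Set.ofList l,
        pvG ((List.count k (l ++ [x]) : Nat) : Int) = pvG ((List.count k l : Nat) : Int) := by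
      intro k hk
      have hkx : k ≠ x := fun he => hx (he ▸ (PySem.Set.mem_ofList l k).mp hk)
      have : List.count k (l ++ [x]) = List.count k l := by
        simp [List.count_append, Ne.symm hkx]
      rw [this]
    rw [List.map_congr_left this]
    simp

theorem pvB_snd (l : List Int) (a : Int) (s : List Int) :
    (l.foldl
      (fun (st : Int × List Int) c => (st.1 + (PySem.List.count st.2 c : Int), st.2 ++ [c]))
      (a, s)).2 = s ++ l := by
  induction l generalizing a s with
  | nil => simp
  | cons c t ih =>
    simp only [List.foldl_cons]
    rw [ih]
    simp

theorem pvB_append (l : List Int) (x : Int) :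
    tinh_cost_alt (l ++ [x]) = tinh_cost_alt l + List.count x l := by
  unfold tinh_cost_alt
  rw [List.foldl_append]
  have h := pvB_snd l 0 []
  simp only [List.foldl_cons, List.foldl_nil]
  rw [h]
  simp [PySem.List.count_eq]

theorem pvAB (l : List Int) : tinh_cost l = tinh_cost_alt l := by
  induction l using List.reverseRecOn with
  | nil => rfl
  | append_singleton t x ih => rw [pvA_append, pvB_append, ih]

-- ===== VERDICT (by name: the statement is the Claim_ definition above) =====
theorem tinh_cost_spec : Claim_equal_tinh_cost := by
  intro l _
  exact pvAB l
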